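-- pv_equiv track=rewrite | github.com/shaynair/geneural.net | genetic/heuristic.py | num_gaps
-- ===== SOURCE A (Python) =====
-- def _is_block(cell):
-- 	return cell != 0
--
-- def _is_empty(cell):
-- 	return cell == 0
--
-- def num_gaps(board):
-- 	"""Like holes, but horizontal. Discourages waiting for the magic I-beam piece.
-- 	Need to find block-gap-block sequences. A wall can substitute for a block."""
-- 	gaps = []
-- 	sequence = 0 # 0 = no progress, 1 = found block, 2 = found block-gap, 3 = found block-gap-block (not used)
-- 	board_copy = []
--
-- 	# Make walls into blocks for simplicity
-- 	for y in range(len(board)):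
-- 		board_copy.append([1] + board[y] + [1])
--
-- 	# Detect gaps
-- 	for y in range(len(board_copy)):
-- 		for x in range(len(board_copy[0])):
-- 			if sequence == 0 and _is_block(board_copy[y][x]):
-- 				sequence = 1
-- 			elif sequence == 1 and _is_empty(board_copy[y][x]):
-- 				sequence = 2
-- 			elif sequence == 2:
-- 				if _is_block(board_copy[y][x]):
-- 					gaps.append(board_copy[y][x-1])
-- 					sequence = 1
-- 				else:
-- 					sequence = 0
--
-- 	return len(gaps)
-- ===== SOURCE B (Python) =====
-- def num_gaps(board):
--     """Count horizontal block-gap-block sequences (walls count as blocks).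
--
--     Different decomposition: instead of a running 3-state automaton, flatten
--     the wall-padded rows (each truncated to the first row's padded width, as
--     the original indexes by it) into one stream and count sliding windows
--     block-gap-block via zip.
--     """
--     if not board:
--         return 0
--     w = len(board[0]) + 2
--     stream = [c for row in board for c in ([1] + row + [1])[:w]]
--     return sum(1 for a, b, c in zip(stream, stream[1:], stream[2:])
--                if a != 0 and b == 0 and c != 0)
-- ===== Notes on version B (the rewrite author's own statement) =====
-- stated objective: simpler
-- what changed: Replaces A's running 3-state automaton (carried across cells and rows) by flattening the wall-padded rows, each truncated to the first row's padded width exactly as A's indexing reads them, into one stream and counting block-gap-block sliding windows with zip.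
import Mathlib
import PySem

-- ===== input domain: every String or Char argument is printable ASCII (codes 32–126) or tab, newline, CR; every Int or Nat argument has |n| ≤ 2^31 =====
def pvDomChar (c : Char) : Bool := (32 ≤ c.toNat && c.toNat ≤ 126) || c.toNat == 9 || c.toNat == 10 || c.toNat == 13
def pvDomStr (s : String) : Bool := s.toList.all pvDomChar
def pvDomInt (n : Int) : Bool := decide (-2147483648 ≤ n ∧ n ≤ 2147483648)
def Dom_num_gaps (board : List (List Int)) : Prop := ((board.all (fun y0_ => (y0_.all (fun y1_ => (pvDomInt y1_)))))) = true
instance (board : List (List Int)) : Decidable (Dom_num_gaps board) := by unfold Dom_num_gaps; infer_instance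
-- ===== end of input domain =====

-- B replaces A's running 3-state automaton by flattening the wall-padded rows
-- (truncated to the first row's padded width, as A's indexing does) into one
-- stream and counting block-gap-block sliding windows; objective: simpler.

-- ===== PORT A =====
-- inner-loop body of A's automaton (sequence: 0 = no progress, 1 = block, 2 = block-gap)
def numGapsStep (r : List Int) (st : List Int × Int) (x : Int) : List Int × Int :=
  let cell := (PySem.List.pyGet? r x).getD 0  -- in range on every input Pre_ admits
  if st.2 = 0 ∧ cell ≠ 0 then (st.1, 1)
  else if st.2 = 1 ∧ cell = 0 then (st.1, 2)
  else if st.2 = 2 then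
    if cell ≠ 0 then (st.1 ++ [(PySem.List.pyGet? r (x - 1)).getD 0], 1)
    else (st.1, 0)
  else st

def num_gaps (board : List (List Int)) : Int :=
  let board_copy := board.foldl (fun acc r => acc ++ [1 :: (r ++ [1])]) []
  let res := board_copy.foldl
    (fun st r =>
      (PySem.List.pyRange 0 (((board_copy.headD []).length : Nat) : Int) 1).foldl
        (numGapsStep r) st)
    (([] : List Int), (0 : Int))
  ((res.1.length : Nat) : Int)

-- ===== PORT B =====
def num_gaps_alt (board : List (List Int)) : Int :=
  match board with
  | [] => 0
  | r0 :: _ =>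
    let w : Int := (r0.length : Int) + 2
    let stream := board.flatMap (fun r => PySem.List.slice (1 :: (r ++ [1])) none (some w))
    let t := (stream.zip (stream.drop 1)).zip (stream.drop 2)
    (((t.filter (fun p => p.1.1 != 0 && p.1.2 == 0 && p.2 != 0)).length : Nat) : Int)

-- ===== PRECONDITION & SPEC =====
-- Pre_ excludes exactly the boards on which A raises IndexError: some row shorter
-- than the first row (A indexes every row by the first row's padded width).
def Pre_num_gaps (board : List (List Int)) : Prop :=
  ∀ r ∈ board, (board.headD []).length ≤ r.length
instance (board : List (List Int)) : Decidable (Pre_num_gaps board) := by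
  unfold Pre_num_gaps; infer_instance

def pvWitness_num_gaps : List (List Int) := [[1, 0, 1], [0, 0, 1]]

def Spec_num_gaps (board : List (List Int)) (out : Int) : Prop := out = num_gaps_alt board
instance (board : List (List Int)) (out : Int) : Decidable (Spec_num_gaps board out) := by
  unfold Spec_num_gaps; infer_instance

-- ===== CLAIM (what is proved, stated in full; the proofs are below) =====
def Claim_equal_num_gaps : Prop :=
  ∀ (board : List (List Int)), Dom_num_gaps board → Pre_num_gaps board →
    Spec_num_gaps board (num_gaps board)

-- ===== LEMMAS AND PROOFS =====

-- number of block-gap-block windows in (a :: b :: S)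
def trip (a b : Int) : List Int → Nat
  | [] => 0
  | c :: S => (if a ≠ 0 ∧ b = 0 ∧ c ≠ 0 then 1 else 0) + trip b c S

-- the last two cells seen (seeded with a, b)
def fin2 (a b : Int) (S : List Int) : Int × Int :=
  S.foldl (fun p c => (p.2, c)) (a, b)

-- A's sequence state as a function of the last two cells
def enc (a b : Int) : Int := if b ≠ 0 then 1 else if a ≠ 0 then 2 else 0

lemma fin2_cons (a b c : Int) (S : List Int) : fin2 a b (c :: S) = fin2 b c S := rfl

lemma fin2_append (a b : Int) (S T : List Int) :
    fin2 a b (S ++ T) = fin2 (fin2 a b S).1 (fin2 a b S).2 T := by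
  simp [fin2, List.foldl_append]

lemma trip_append (S : List Int) : ∀ (a b : Int) (T : List Int),
    trip a b (S ++ T) = trip a b S + trip (fin2 a b S).1 (fin2 a b S).2 T := by
  induction S with
  | nil => intro a b T; simp [trip, fin2]
  | cons c S ih => intro a b T; simp [trip, fin2_cons, ih, Nat.add_assoc]

lemma numGapsStep_cell (r : List Int) (g : List Int) (a b : Int) (lo : Nat)
    (hlo : lo < r.length) :
    ∃ G : List Int,
      numGapsStep r (g, enc a b) (lo : Int) = (G, enc b r[lo]) ∧
      G.length = g.length + (if a ≠ 0 ∧ b = 0 ∧ r[lo] ≠ 0 then 1 else 0) := by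
  have hget : PySem.List.pyGet? r (lo : Int) = some r[lo] := by
    simp [PySem.List.pyGet?_natCast, List.getElem?_eq_getElem hlo]
  by_cases hb : b = 0
  · by_cases ha : a = 0
    · by_cases hc : r[lo] = 0 <;>
        simp [numGapsStep, hget, enc, ha, hb, hc]
    · by_cases hc : r[lo] = 0 <;>
        simp [numGapsStep, hget, enc, ha, hb, hc]
  · by_cases hc : r[lo] = 0 <;>
      simp [numGapsStep, hget, enc, hb, hc]

lemma rowA (r : List Int) :
    ∀ (n lo : Nat), lo + n ≤ r.length → ∀ (g : List Int) (a b : Int),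
    ∃ G : List Int,
      (PySem.List.pyRange (lo : Int) ((lo + n : Nat) : Int) 1).foldl (numGapsStep r) (g, enc a b)
        = (G, enc (fin2 a b ((r.drop lo).take n)).1 (fin2 a b ((r.drop lo).take n)).2) ∧
      G.length = g.length + trip a b ((r.drop lo).take n) := by
  intro n
  induction n with
  | zero =>
      intro lo _ g a b
      refine ⟨g, ?_, ?_⟩ <;> simp [PySem.List.pyRange_one_eq_nil, fin2, trip]
  | succ n ih =>
      intro lo hle g a b
      have hlo : lo < r.length := by omega
      have hcons : PySem.List.pyRange (lo : Int) ((lo + (n + 1) : Nat) : Int) 1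
          = (lo : Int) :: PySem.List.pyRange ((lo : Int) + 1) ((lo + (n + 1) : Nat) : Int) 1 := by
        exact PySem.List.pyRange_one_cons (by exact_mod_cast Nat.lt_add_of_pos_right n.succ_pos)
      have hcast1 : ((lo : Int) + 1) = (((lo + 1 : Nat)) : Int) := by push_cast; ring
      have hcast2 : ((lo + (n + 1) : Nat) : Int) = (((lo + 1) + n : Nat) : Int) := by
        congr 1; omega
      obtain ⟨G1, hstep, hlen1⟩ := numGapsStep_cell r g a b lo hlo
      obtain ⟨G, hfold, hlen⟩ := ih (lo + 1) (by omega) G1 b r[lo]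
      refine ⟨G, ?_, ?_⟩
      · rw [hcons, List.foldl_cons, hstep, hcast1, hcast2, hfold]
        have hseg : (r.drop lo).take (n + 1) = r[lo] :: (r.drop (lo + 1)).take n := by
          rw [List.drop_eq_getElem_cons hlo, List.take_succ_cons]
        rw [hseg, fin2_cons]
      · have hseg : (r.drop lo).take (n + 1) = r[lo] :: (r.drop (lo + 1)).take n := by
          rw [List.drop_eq_getElem_cons hlo, List.take_succ_cons]
        rw [hseg]
        simp only [trip]
        omega

lemma rowsA (w : Nat) :
    ∀ (rows : List (List Int)), (∀ r ∈ rows, w ≤ r.length) → ∀ (g : List Int) (a b : Int),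
    ∃ G : List Int,
      rows.foldl (fun st r => (PySem.List.pyRange 0 ((w : Nat) : Int) 1).foldl (numGapsStep r) st)
        (g, enc a b)
        = (G, enc (fin2 a b (rows.flatMap (fun r => r.take w))).1
                  (fin2 a b (rows.flatMap (fun r => r.take w))).2) ∧
      G.length = g.length + trip a b (rows.flatMap (fun r => r.take w)) := by
  intro rows
  induction rows with
  | nil => intro _ g a b; exact ⟨g, by simp [fin2], by simp [trip]⟩
  | cons r rows ih =>
      intro hw g a b
      have hr : w ≤ r.length := hw r (List.mem_cons_self ..)
      obtain ⟨G1, h1, hlen1⟩ := rowA r w 0 (by omega) g a b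
      simp only [Nat.zero_add, Nat.cast_zero, List.drop_zero] at h1 hlen1
      obtain ⟨G, h2, hlen2⟩ :=
        ih (fun r' hr' => hw r' (List.mem_cons_of_mem _ hr'))
          G1 (fin2 a b (r.take w)).1 (fin2 a b (r.take w)).2
      refine ⟨G, ?_, ?_⟩
      · simp only [List.foldl_cons, h1, h2, List.flatMap_cons, fin2_append]
      · simp only [List.flatMap_cons, trip_append]
        omega

lemma zip_filter_eq_trip :
    ∀ (S : List Int) (a b : Int),
      ((((a :: b :: S).zip ((a :: b :: S).drop 1)).zip ((a :: b :: S).drop 2)).filter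
          (fun p => p.1.1 != 0 && p.1.2 == 0 && p.2 != 0)).length = trip a b S := by
  intro S
  induction S with
  | nil => intro a b; simp [trip]
  | cons c S ih =>
      intro a b
      have := ih b c
      by_cases ha : a = 0 <;> by_cases hb : b = 0 <;> by_cases hc : c = 0 <;>
        simp_all [trip, List.zip_cons_cons]
      all_goals omega

lemma trip_zero_zero (x y : Int) (S : List Int) : trip 0 0 (x :: y :: S) = trip x y S := by
  simp [trip]

-- ===== VERDICT (by name: the statement is the Claim_ definition above) =====
theorem num_gaps_spec : Claim_equal_num_gaps := by
  intro board _ hpre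
  unfold Spec_num_gaps
  cases board with
  | nil => rfl
  | cons r0 rows =>
      unfold num_gaps num_gaps_alt
      simp only [PySem.List.foldl_append_singleton_eq_map, List.nil_append]
      have hwall : ∀ r ∈ List.map (fun r => (1 : Int) :: (r ++ [1])) (r0 :: rows),
          r0.length + 2 ≤ r.length := by
        intro r hr
        obtain ⟨r', hr', rfl⟩ := List.mem_map.mp hr
        have := hpre r' hr'
        simp only [List.headD_cons] at this
        simp; omega
      obtain ⟨G, hfold, hlen⟩ :=
        rowsA (r0.length + 2) (List.map (fun r => (1 : Int) :: (r ++ [1])) (r0 :: rows)) hwall [] 0 0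
      rw [show enc 0 0 = (0 : Int) from by simp [enc]] at hfold
      have hhead : ((List.map (fun r => (1 : Int) :: (r ++ [1])) (r0 :: rows)).headD []).length
          = r0.length + 2 := by simp
      rw [hhead, hfold]
      -- B's sliced rows are A's truncated padded rows
      have hslice : (r0 :: rows).flatMap
            (fun r => PySem.List.slice ((1 : Int) :: (r ++ [1])) none (some ((r0.length : Int) + 2)))
          = (List.map (fun r => (1 : Int) :: (r ++ [1])) (r0 :: rows)).flatMap
              (fun r => r.take (r0.length + 2)) := by
        rw [List.flatMap_map]
        have hfun : (fun r : List Int =>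
              PySem.List.slice ((1 : Int) :: (r ++ [1])) none (some ((r0.length : Int) + 2)))
            = fun r : List Int => ((1 : Int) :: (r ++ [1])).take (r0.length + 2) := by
          funext r
          rw [PySem.List.slice_to _ (by positivity),
            show ((r0.length : Int) + 2).toNat = r0.length + 2 from by omega]
        rw [hfun]
      rw [hslice]
      -- the common stream starts with the full first padded row
      have htake : ((1 : Int) :: (r0 ++ [1])).take (r0.length + 2) = (1 : Int) :: (r0 ++ [1]) :=
        List.take_of_length_le (by simp)
      rcases hyT : (r0 ++ [1]) ++ (List.map (fun r => (1 : Int) :: (r ++ [1])) rows).flatMap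
          (fun r => r.take (r0.length + 2)) with _ | ⟨y, T⟩
      · exfalso; simp at hyT
      · have hS : (List.map (fun r => (1 : Int) :: (r ++ [1])) (r0 :: rows)).flatMap
              (fun r => r.take (r0.length + 2)) = (1 : Int) :: y :: T := by
          rw [List.map_cons, List.flatMap_cons, htake, List.cons_append, hyT]
        rw [hS] at hlen
        rw [hS, zip_filter_eq_trip T 1 y]
        simp [hlen, trip_zero_zero]
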